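-- pv_equiv track=rewrite | github.com/SaarShai/Primes-Equispaced | experiments/nanite_honest_assessment.py | count_tjunctions
-- ===== SOURCE A (Python) =====
-- def count_tjunctions(kept_set, N):
--     """Count T-junctions on the grid."""
--     cracks = 0
--     for i in range(N+1):
--         for j in range(N-1):
--             if (i,j) in kept_set and (i,j+2) in kept_set and (i,j+1) not in kept_set:
--                 cracks += 1
--     for j in range(N+1):
--         for i in range(N-1):
--             if (i,j) in kept_set and (i+2,j) in kept_set and (i+1,j) not in kept_set:
--                 cracks += 1
--     return cracks
-- ===== SOURCE B (Python) =====
-- def count_tjunctions(kept_set, N):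
--     """Count T-junctions on the grid (single pass over the kept cells)."""
--     S = set(kept_set)
--     cracks = 0
--     for (i, j) in S:
--         if 0 <= i <= N and 0 <= j <= N - 2 and (i, j + 2) in S and (i, j + 1) not in S:
--             cracks += 1
--         if 0 <= j <= N and 0 <= i <= N - 2 and (i + 2, j) in S and (i + 1, j) not in S:
--             cracks += 1
--     return cracks
-- ===== Notes on version B (the rewrite author's own statement) =====
-- stated objective: faster
-- what changed: Replaces A's two O(N^2) scans over every grid position by a single pass over the distinct kept cells: each kept cell in range is tested once as the left/top end of a length-2 gap, so the cost depends on the number of kept cells, not on the grid size.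
import Mathlib
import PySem

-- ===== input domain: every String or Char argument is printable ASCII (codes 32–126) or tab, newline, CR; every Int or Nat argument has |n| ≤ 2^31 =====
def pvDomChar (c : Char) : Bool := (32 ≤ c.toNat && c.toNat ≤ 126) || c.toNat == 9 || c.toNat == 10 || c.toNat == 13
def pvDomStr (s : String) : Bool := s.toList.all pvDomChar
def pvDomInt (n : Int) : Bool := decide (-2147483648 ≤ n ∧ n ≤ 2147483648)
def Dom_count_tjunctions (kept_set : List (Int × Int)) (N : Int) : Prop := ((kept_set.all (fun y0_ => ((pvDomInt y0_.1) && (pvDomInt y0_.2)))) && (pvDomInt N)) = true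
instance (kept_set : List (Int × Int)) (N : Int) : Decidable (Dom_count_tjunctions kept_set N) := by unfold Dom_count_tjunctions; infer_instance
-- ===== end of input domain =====

-- B replaces A's two O(N^2) grid scans by one pass over the distinct kept cells (faster when the grid is large and sparse).


-- ===== PORT A =====
def count_tjunctions (kept_set : List (Int × Int)) (N : Int) : Int :=
  let cracks : Int := 0
  let cracks := (PySem.List.pyRange 0 (N+1) 1).foldl (fun acc i =>
    (PySem.List.pyRange 0 (N-1) 1).foldl (fun acc2 j =>
      if (i, j) ∈ kept_set ∧ (i, j+2) ∈ kept_set ∧ (i, j+1) ∉ kept_set then acc2 + 1 else acc2) acc) cracks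
  let cracks := (PySem.List.pyRange 0 (N+1) 1).foldl (fun acc j =>
    (PySem.List.pyRange 0 (N-1) 1).foldl (fun acc2 i =>
      if (i, j) ∈ kept_set ∧ (i+2, j) ∈ kept_set ∧ (i+1, j) ∉ kept_set then acc2 + 1 else acc2) acc) cracks
  cracks

-- ===== PORT B =====
def count_tjunctions_alt (kept_set : List (Int × Int)) (N : Int) : Int :=
  let S : PySem.Set (Int × Int) := PySem.Set.ofList kept_set
  S.foldl (fun acc p =>
    let acc := if 0 ≤ p.1 ∧ p.1 ≤ N ∧ 0 ≤ p.2 ∧ p.2 ≤ N - 2 ∧ (p.1, p.2 + 2) ∈ S ∧ (p.1, p.2 + 1) ∉ S then acc + 1 else acc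
    if 0 ≤ p.2 ∧ p.2 ≤ N ∧ 0 ≤ p.1 ∧ p.1 ≤ N - 2 ∧ (p.1 + 2, p.2) ∈ S ∧ (p.1 + 1, p.2) ∉ S then acc + 1 else acc) 0

-- ===== PRECONDITION & SPEC =====
def Spec_count_tjunctions (kept_set : List (Int × Int)) (N : Int) (out : Int) : Prop := out = count_tjunctions_alt kept_set N
instance (kept_set : List (Int × Int)) (N : Int) (out : Int) : Decidable (Spec_count_tjunctions kept_set N out) := by unfold Spec_count_tjunctions; infer_instance

-- ===== CLAIM (what is proved, stated in full; the proofs are below) =====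
def Claim_equal_count_tjunctions : Prop := ∀ (kept_set : List (Int × Int)) (N : Int), Dom_count_tjunctions kept_set N → Spec_count_tjunctions kept_set N (count_tjunctions kept_set N)

-- ===== LEMMAS AND PROOFS =====

-- all (i, j) with i ∈ R and j ∈ R', in A's traversal order
def pvPairs (R R' : List Int) : List (Int × Int) := R.flatMap (fun i => R'.map (fun j => (i, j)))

theorem pvMem_pairs (R R' : List Int) (p : Int × Int) : p ∈ pvPairs R R' ↔ p.1 ∈ R ∧ p.2 ∈ R' := by
  cases p with
  | mk a b => simp [pvPairs]

theorem pvNodup_pairs (R R' : List Int) (hR : R.Nodup) (hR' : R'.Nodup) : (pvPairs R R').Nodup := by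
  induction R with
  | nil => simp [pvPairs]
  | cons a R ih =>
    simp only [pvPairs, List.flatMap_cons]
    rcases List.nodup_cons.mp hR with ⟨ha, hR2⟩
    refine List.Nodup.append (hR'.map ?_) (ih hR2) ?_
    · intro x y hxy; simpa using congrArg Prod.snd hxy
    · intro p hp1 hp2
      rcases List.mem_map.mp hp1 with ⟨j, _, rfl⟩
      exact ha ((pvMem_pairs R R' _).mp hp2).1

theorem pvSum_count_pairs (R R' : List Int) (Q : Int × Int → Bool) :
    (R.map (fun i => ((R'.countP (fun j => Q (i, j))) : Int))).sum = ((pvPairs R R').countP Q : Int) := by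
  induction R with
  | nil => simp [pvPairs]
  | cons a R ih =>
    simp only [pvPairs, List.flatMap_cons, List.countP_append, List.map_cons, List.sum_cons,
      List.countP_map, Function.comp_def] at ih ⊢
    rw [ih]
    push_cast
    ring

theorem pvCountP_pairs_eq (R R' : List Int) (S : List (Int × Int)) (hR : R.Nodup) (hR' : R'.Nodup)
    (hS : S.Nodup) (Q : Int × Int → Bool) (himp : ∀ p, Q p = true → p ∈ S) :
    (pvPairs R R').countP Q = S.countP (fun p => decide (p.1 ∈ R) && decide (p.2 ∈ R') && Q p) := by
  rw [List.countP_eq_length_filter, List.countP_eq_length_filter]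
  refine List.Perm.length_eq ?_
  rw [List.perm_ext_iff_of_nodup ((pvNodup_pairs R R' hR hR').filter _) (hS.filter _)]
  intro p
  simp only [List.mem_filter, pvMem_pairs, Bool.and_eq_true, decide_eq_true_eq]
  constructor
  · rintro ⟨⟨h1, h2⟩, hq⟩; exact ⟨himp p hq, ⟨h1, h2⟩, hq⟩
  · rintro ⟨_, ⟨h1, h2⟩, hq⟩; exact ⟨⟨h1, h2⟩, hq⟩

theorem pvFoldl_two_ifs (l : List (Int × Int)) (h v : Int × Int → Prop)
    [DecidablePred h] [DecidablePred v] (init : Int) :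
    l.foldl (fun acc p =>
      let acc := if h p then acc + 1 else acc
      if v p then acc + 1 else acc) init
    = init + (l.countP (fun p => decide (h p)) : Int) + (l.countP (fun p => decide (v p)) : Int) := by
  induction l generalizing init with
  | nil => simp
  | cons a l ih =>
    simp only [List.foldl_cons, List.countP_cons, ih]
    split_ifs <;> simp_all <;> ring

theorem pvMain (kept_set : List (Int × Int)) (N : Int) :
    count_tjunctions kept_set N = count_tjunctions_alt kept_set N := by
  have hS : (PySem.Set.ofList kept_set).Nodup := PySem.Set.nodup_ofList kept_set
  have hmemS : ∀ p : Int × Int, p ∈ PySem.Set.ofList kept_set ↔ p ∈ kept_set := by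
    intro p; simp [PySem.Set.mem_ofList]
  have hRn := PySem.List.nodup_pyRange_one (a := (0:Int)) (b := N+1)
  have hR'n := PySem.List.nodup_pyRange_one (a := (0:Int)) (b := N-1)
  -- A as two pair-counts
  have hA : count_tjunctions kept_set N
      = 0 + ((pvPairs (PySem.List.pyRange 0 (N+1) 1) (PySem.List.pyRange 0 (N-1) 1)).countP
              (fun p => decide ((p.1, p.2) ∈ kept_set ∧ (p.1, p.2+2) ∈ kept_set ∧ (p.1, p.2+1) ∉ kept_set)) : Int)
        + ((pvPairs (PySem.List.pyRange 0 (N+1) 1) (PySem.List.pyRange 0 (N-1) 1)).countP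
              (fun p => decide ((p.2, p.1) ∈ kept_set ∧ (p.2+2, p.1) ∈ kept_set ∧ (p.2+1, p.1) ∉ kept_set)) : Int) := by
    simp only [count_tjunctions]
    rw [show (fun (acc : Int) (i : Int) =>
      (PySem.List.pyRange 0 (N-1) 1).foldl (fun acc2 j =>
        if (i, j) ∈ kept_set ∧ (i, j+2) ∈ kept_set ∧ (i, j+1) ∉ kept_set then acc2 + 1 else acc2) acc)
      = (fun (acc : Int) (i : Int) => acc + ((PySem.List.pyRange 0 (N-1) 1).countP
          (fun j => decide ((i, j) ∈ kept_set ∧ (i, j+2) ∈ kept_set ∧ (i, j+1) ∉ kept_set)) : Int))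
      from funext fun acc => funext fun i => PySem.List.foldl_ite_add_one _ _ _]
    rw [show (fun (acc : Int) (j : Int) =>
      (PySem.List.pyRange 0 (N-1) 1).foldl (fun acc2 i =>
        if (i, j) ∈ kept_set ∧ (i+2, j) ∈ kept_set ∧ (i+1, j) ∉ kept_set then acc2 + 1 else acc2) acc)
      = (fun (acc : Int) (j : Int) => acc + ((PySem.List.pyRange 0 (N-1) 1).countP
          (fun i => decide ((i, j) ∈ kept_set ∧ (i+2, j) ∈ kept_set ∧ (i+1, j) ∉ kept_set)) : Int))
      from funext fun acc => funext fun j => PySem.List.foldl_ite_add_one _ _ _]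
    rw [PySem.List.foldl_add, PySem.List.foldl_add]
    rw [pvSum_count_pairs _ _ (fun p => decide ((p.1, p.2) ∈ kept_set ∧ (p.1, p.2+2) ∈ kept_set ∧ (p.1, p.2+1) ∉ kept_set)),
        pvSum_count_pairs _ _ (fun p => decide ((p.2, p.1) ∈ kept_set ∧ (p.2+2, p.1) ∈ kept_set ∧ (p.2+1, p.1) ∉ kept_set))]
  -- B as two countPs over S
  have hB : count_tjunctions_alt kept_set N
      = 0 + ((PySem.Set.ofList kept_set).countP (fun p => decide (0 ≤ p.1 ∧ p.1 ≤ N ∧ 0 ≤ p.2 ∧ p.2 ≤ N - 2 ∧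
              (p.1, p.2 + 2) ∈ PySem.Set.ofList kept_set ∧ (p.1, p.2 + 1) ∉ PySem.Set.ofList kept_set)) : Int)
        + ((PySem.Set.ofList kept_set).countP (fun p => decide (0 ≤ p.2 ∧ p.2 ≤ N ∧ 0 ≤ p.1 ∧ p.1 ≤ N - 2 ∧
              (p.1 + 2, p.2) ∈ PySem.Set.ofList kept_set ∧ (p.1 + 1, p.2) ∉ PySem.Set.ofList kept_set)) : Int) := by
    simp only [count_tjunctions_alt]
    exact pvFoldl_two_ifs _ _ _ 0
  rw [hA, hB]
  congr 1
  · congr 1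
    · -- horizontal
      rw [pvCountP_pairs_eq _ _ (PySem.Set.ofList kept_set) hRn hR'n hS _
          (by rintro ⟨a, b⟩ hq
              simp only [decide_eq_true_eq] at hq
              exact (hmemS (a, b)).mpr hq.1)]
      congr 1
      refine List.countP_congr ?_
      rintro ⟨a, b⟩ hp
      have hab : (a, b) ∈ kept_set := (hmemS (a, b)).mp hp
      simp only [PySem.List.mem_pyRange_one, decide_eq_true_eq, Bool.and_eq_true,
        hmemS]
      rw [show (a < N + 1 ↔ a ≤ N) from by omega, show (b < N - 1 ↔ b ≤ N - 2) from by omega]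
      tauto
  · -- vertical
    rw [pvCountP_pairs_eq _ _ ((PySem.Set.ofList kept_set).map Prod.swap) hRn hR'n
        (hS.map Prod.swap_injective) _
        (by rintro ⟨a, b⟩ hq
            simp only [decide_eq_true_eq] at hq
            exact List.mem_map.mpr ⟨(b, a), (hmemS (b, a)).mpr hq.1, rfl⟩)]
    rw [List.countP_map]
    congr 1
    refine List.countP_congr ?_
    rintro ⟨a, b⟩ hp
    have hab : (a, b) ∈ kept_set := (hmemS (a, b)).mp hp
    simp only [Function.comp_def, Prod.swap, PySem.List.mem_pyRange_one, decide_eq_true_eq,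
      Bool.and_eq_true, hmemS]
    rw [show (b < N + 1 ↔ b ≤ N) from by omega, show (a < N - 1 ↔ a ≤ N - 2) from by omega]
    tauto

-- ===== VERDICT (by name: the statement is the Claim_ definition above) =====
theorem count_tjunctions_spec : Claim_equal_count_tjunctions := by
  intro kept_set N _
  unfold Spec_count_tjunctions
  exact pvMain kept_set N
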